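-- pv_equiv track=rewrite | github.com/rmoskwa/Pulsepal | generate_matlab_docs.py | generate_index_page
-- ===== SOURCE A (Python) =====
-- from typing import Dict, List, Any, Set
--
-- def generate_index_page(functions: List[Dict[str, Any]]) -> str:
--     """Generate index page with all functions listed."""
--     content = ["# MATLAB API Reference\n"]
--     content.append("Complete reference for PulsePal MATLAB functions.\n")
--
--     # Group functions by first letter
--     grouped = {}
--     for func in sorted(functions, key=lambda x: x.get('name', '').lower()):
--         name = func.get('name', '')
--         if name:
--             first_letter = name[0].upper()
--             if not first_letter.isalpha():
--                 first_letter = '#'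
--
--             if first_letter not in grouped:
--                 grouped[first_letter] = []
--             grouped[first_letter].append(func)
--
--     # Create alphabetical sections
--     for letter in sorted(grouped.keys()):
--         content.append(f"## {letter}\n")
--
--         for func in grouped[letter]:
--             name = func.get('name', '')
--             description = func.get('description', '')
--
--             # Truncate description for index
--             if description and len(description) > 100:
--                 description = description[:97] + "..."
--
--             content.append(f"- [{name}]({name}.md) - {description}")
--         content.append("")
--
--     return '\n'.join(content)
-- ===== SOURCE B (Python) =====
-- def _letter(name):
--     """Section letter for a (non-empty) function name."""
--     fl = name[0].upper()
--     return fl if fl.isalpha() else '#'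
--
--
-- def _entry_line(func):
--     name = func.get('name', '')
--     description = func.get('description', '')
--     if description and len(description) > 100:
--         description = description[:97] + "..."
--     return f"- [{name}]({name}.md) - {description}"
--
--
-- def _section(ordered, letter):
--     return [_entry_line(func) for func in ordered
--             if func.get('name', '') and _letter(func.get('name', '')) == letter]
--
--
-- def generate_index_page(functions):
--     """Generate index page with all functions listed."""
--     lines = ["# MATLAB API Reference\n", "Complete reference for PulsePal MATLAB functions.\n"]
--     ordered = sorted(functions, key=lambda x: x.get('name', '').lower())
--     # One filtered scan per possible section letter ('#' collects every
--     # non-alphabetic initial); no intermediate dict and no key re-sort.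
--     for letter in '#ABCDEFGHIJKLMNOPQRSTUVWXYZ':
--         section = _section(ordered, letter)
--         if section:
--             lines.append(f"## {letter}\n")
--             lines.extend(section)
--             lines.append("")
--     return '\n'.join(lines)
-- ===== Notes on version B (the rewrite author's own statement) =====
-- stated objective: alternative
-- what changed: Replaces A's mutable grouping dict plus separate key re-sort with one sort followed by a fixed scan over the 27 possible section letters ('#', 'A'..'Z'), emitting each non-empty filtered section directly.
import Mathlib
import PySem

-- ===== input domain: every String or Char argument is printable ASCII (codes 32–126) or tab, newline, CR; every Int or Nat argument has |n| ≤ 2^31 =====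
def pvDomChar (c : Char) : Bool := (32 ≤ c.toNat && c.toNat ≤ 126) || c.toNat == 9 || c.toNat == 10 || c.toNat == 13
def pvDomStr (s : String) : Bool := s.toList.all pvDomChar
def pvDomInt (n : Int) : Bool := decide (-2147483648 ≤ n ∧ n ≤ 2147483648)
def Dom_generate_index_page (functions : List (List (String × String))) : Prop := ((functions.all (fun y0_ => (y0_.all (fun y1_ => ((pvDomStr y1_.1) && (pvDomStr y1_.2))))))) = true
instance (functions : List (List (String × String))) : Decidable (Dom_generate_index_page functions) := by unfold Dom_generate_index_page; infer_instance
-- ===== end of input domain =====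

-- B replaces A's mutable grouping dict and separate key re-sort by one sort plus a fixed
-- scan over the 27 possible section letters, emitting each non-empty section directly
-- (objective: alternative decomposition; same return value).
-- Python's one-character strings (the group letters) are represented as Char in both ports.

-- ===== PORT A =====
def generate_index_page (functions : List (List (String × String))) : String :=
  let content : List String :=
    ["# MATLAB API Reference\n", "Complete reference for PulsePal MATLAB functions.\n"]
  -- Group functions by first letter
  let grouped : PySem.Dict Char (List (List (String × String))) :=
    (PySem.List.sorted functions
        (fun x => PySem.Str.lower ((PySem.Dict.mk x).getD "name" ""))).foldl
      (fun grouped func =>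
        let name := (PySem.Dict.mk func).getD "name" ""
        if name ≠ "" then
          -- name[0] (guarded by name ≠ ""); .upper() on one ASCII char is upperChar
          let firstLetter := PySem.Chars.upperChar (name.toList.headD ' ')
          let firstLetter := if ¬ (PySem.Chars.isalpha firstLetter = true) then '#' else firstLetter
          -- 'if first_letter not in grouped: grouped[first_letter] = []' is setdefault;
          -- '.append(func)' on the entry is modify
          (grouped.setdefault firstLetter []).modify firstLetter [] (· ++ [func])
        else grouped)
      PySem.Dict.empty
  -- Create alphabetical sections
  let content :=
    (PySem.List.sorted grouped.keys (fun k => k)).foldl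
      (fun content letter =>
        let content := content ++ ["## " ++ String.ofList [letter] ++ "\n"]
        let content :=
          (grouped.getD letter []).foldl
            (fun content func =>
              let name := (PySem.Dict.mk func).getD "name" ""
              let description := (PySem.Dict.mk func).getD "description" ""
              let description :=
                if description ≠ "" ∧ 100 < PySem.Str.len description then
                  PySem.Str.slice description none (some 97) ++ "..."
                else description
              content ++ ["- [" ++ name ++ "](" ++ name ++ ".md) - " ++ description])
            content
        content ++ [""])
      content
  PySem.Str.join "\n" content

-- ===== PORT B =====
def pvLetterB (name : String) : Char :=
  let fl := PySem.Chars.upperChar (name.toList.headD ' ')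
  if PySem.Chars.isalpha fl then fl else '#'

def pvEntryLineB (func : List (String × String)) : String :=
  let name := (PySem.Dict.mk func).getD "name" ""
  let description := (PySem.Dict.mk func).getD "description" ""
  let description :=
    if description ≠ "" ∧ 100 < PySem.Str.len description then
      PySem.Str.slice description none (some 97) ++ "..."
    else description
  "- [" ++ name ++ "](" ++ name ++ ".md) - " ++ description

def pvSectionB (ordered : List (List (String × String))) (letter : Char) : List String :=
  ordered.foldl
    (fun sec func =>
      if (PySem.Dict.mk func).getD "name" "" ≠ "" ∧
          pvLetterB ((PySem.Dict.mk func).getD "name" "") = letter then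
        sec ++ [pvEntryLineB func]
      else sec) []

def generate_index_page_alt (functions : List (List (String × String))) : String :=
  let ordered :=
    PySem.List.sorted functions
      (fun x => PySem.Str.lower ((PySem.Dict.mk x).getD "name" ""))
  let lines :=
    ("#ABCDEFGHIJKLMNOPQRSTUVWXYZ".toList).foldl
      (fun lines letter =>
        let sect := pvSectionB ordered letter
        if sect ≠ [] then
          lines ++ ["## " ++ String.ofList [letter] ++ "\n"] ++ sect ++ [""]
        else lines)
      ["# MATLAB API Reference\n", "Complete reference for PulsePal MATLAB functions.\n"]
  PySem.Str.join "\n" lines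

-- ===== PRECONDITION & SPEC =====
def Spec_generate_index_page (functions : List (List (String × String))) (out : String) : Prop := out = generate_index_page_alt functions
instance (functions : List (List (String × String))) (out : String) : Decidable (Spec_generate_index_page functions out) := by unfold Spec_generate_index_page; infer_instance

-- ===== CLAIM (what is proved, stated in full; the proofs are below) =====
def Claim_equal_generate_index_page : Prop := ∀ (functions : List (List (String × String))), Dom_generate_index_page functions → Spec_generate_index_page functions (generate_index_page functions)



-- ===== LEMMAS AND PROOFS =====

-- Proof-side abbreviations (used only below)
def pvName (f : List (String × String)) : String := (PySem.Dict.mk f).getD "name" ""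

def pvOrdered (fs : List (List (String × String))) : List (List (String × String)) :=
  PySem.List.sorted fs (fun x => PySem.Str.lower ((PySem.Dict.mk x).getD "name" ""))

def pvF (fs : List (List (String × String))) : List (List (String × String)) :=
  (pvOrdered fs).filter (fun f => decide (pvName f ≠ ""))

def pvKey (f : List (String × String)) : Char := pvLetterB (pvName f)

def pvL27 : List Char := "#ABCDEFGHIJKLMNOPQRSTUVWXYZ".toList

def pvG (fs : List (List (String × String))) : PySem.Dict Char (List (List (String × String))) :=
  (pvF fs).foldl (fun g f => g.modify (pvKey f) [] (· ++ [f])) PySem.Dict.empty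

def pvC (fs : List (List (String × String))) : List Char :=
  pvL27.filter (fun c => (pvF fs).any (fun f => pvKey f == c))

def pvHdr (c : Char) : String := "## " ++ String.ofList [c] ++ "\n"

def pvInit : List String :=
  ["# MATLAB API Reference\n", "Complete reference for PulsePal MATLAB functions.\n"]

def pvTarget (fs : List (List (String × String))) : List String :=
  (pvC fs).foldl
    (fun acc c =>
      acc ++ [pvHdr c] ++ ((pvF fs).filter (fun f => pvKey f == c)).map pvEntryLineB ++ [""])
    pvInit

-- A's grouping-loop body, line-formatting expression and sections loop, as standalone terms
def pvABody (grouped : PySem.Dict Char (List (List (String × String))))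
    (func : List (String × String)) : PySem.Dict Char (List (List (String × String))) :=
  let name := (PySem.Dict.mk func).getD "name" ""
  if name ≠ "" then
    let firstLetter := PySem.Chars.upperChar (name.toList.headD ' ')
    let firstLetter := if ¬ (PySem.Chars.isalpha firstLetter = true) then '#' else firstLetter
    (grouped.setdefault firstLetter []).modify firstLetter [] (· ++ [func])
  else grouped

def pvALine (func : List (String × String)) : String :=
  let name := (PySem.Dict.mk func).getD "name" ""
  let description := (PySem.Dict.mk func).getD "description" ""
  let description :=
    if description ≠ "" ∧ 100 < PySem.Str.len description then
      PySem.Str.slice description none (some 97) ++ "..."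
    else description
  "- [" ++ name ++ "](" ++ name ++ ".md) - " ++ description

def pvAOuter (grouped : PySem.Dict Char (List (List (String × String))))
    (content : List String) (letter : Char) : List String :=
  let content := content ++ ["## " ++ String.ofList [letter] ++ "\n"]
  let content :=
    (grouped.getD letter []).foldl (fun content func => content ++ [pvALine func]) content
  content ++ [""]

theorem pv_sd_mod {b : Type} (d : PySem.Dict Char b) (k : Char) (v : b) (g : b -> b) :
    (d.setdefault k v).modify k v g = d.modify k v g := by
  by_cases h : d.contains k = true
  . rw [PySem.Dict.setdefault_of_contains d v h]
  . replace h : d.contains k = false := by simpa using h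
    rw [PySem.Dict.setdefault_of_not_contains d v h]
    show (d.insert k v).insert k (g ((d.insert k v).getD k v)) = d.insert k (g (d.getD k v))
    rw [PySem.Dict.getD_insert_self, PySem.Dict.insert_insert_self,
      PySem.Dict.getD_of_not_contains d v h]

theorem pv_mem_L27_of_code (c : Char) (h1 : 65 <= c.toNat) (h2 : c.toNat <= 90) : c ∈ pvL27 := by
  have hc : c = Char.ofNat c.toNat := (Char.ofNat_toNat c).symm
  rw [hc]; interval_cases h : c.toNat <;> decide

theorem pv_letterB_mem (name : String) : pvLetterB name ∈ pvL27 := by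
  unfold pvLetterB
  set c := name.toList.headD ' ' with hc
  by_cases hl : PySem.Chars.islower c = true
  . have hb : 97 <= c.toNat ∧ c.toNat <= 122 := by
      simpa [PySem.Chars.islower, Char.le_def] using hl
    have hv : (c.toNat - 32).isValidChar := by
      left; omega
    have ht : (Char.ofNat (c.toNat - 32)).toNat = c.toNat - 32 := by
      rw [Char.toNat_ofNat, if_pos hv]
    have hu : PySem.Chars.upperChar c = Char.ofNat (c.toNat - 32) := by
      simp [PySem.Chars.upperChar, hl]
    have hup : PySem.Chars.isupper (PySem.Chars.upperChar c) = true := by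
      rw [hu]
      simp only [PySem.Chars.isupper, Bool.and_eq_true, decide_eq_true_eq, Char.le_def,
        UInt32.le_iff_toNat_le]
      show 65 <= (Char.ofNat (c.toNat - 32)).toNat ∧ (Char.ofNat (c.toNat - 32)).toNat <= 90
      omega
    simp only [hu] at hup ⊢
    rw [if_pos (by simp [PySem.Chars.isalpha, hup])]
    exact pv_mem_L27_of_code _ (by rw [ht]; omega) (by rw [ht]; omega)
  . have hu : PySem.Chars.upperChar c = c := by
      simp [PySem.Chars.upperChar, hl]
    rw [hu]
    by_cases ha : PySem.Chars.isalpha c = true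
    . have hup : PySem.Chars.isupper c = true := by
        rcases Bool.or_eq_true_iff.mp (by simpa [PySem.Chars.isalpha] using ha) with h | h
        . exact h
        . exact absurd h hl
      have hb : 65 <= c.toNat ∧ c.toNat <= 90 := by
        simpa [PySem.Chars.isupper, Char.le_def] using hup
      rw [if_pos ha]
      exact pv_mem_L27_of_code _ hb.1 hb.2
    . rw [if_neg ha]; decide

theorem pv_abody_eq : pvABody =
    (fun g f => if pvName f ≠ "" then g.modify (pvKey f) [] (· ++ [f]) else g) := by
  funext g f
  by_cases h : pvName f ≠ "" <;>
    cases hb : PySem.Chars.isalpha (PySem.Chars.upperChar ((pvName f).toList.headD ' ')) <;>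
    simp only [pvABody, pvName, pvKey, pvLetterB, List.headD_eq_head?_getD] at h hb ⊢ <;>
    simp [h, hb, pv_sd_mod]

theorem pv_grouped_eq (fs : List (List (String × String))) :
    (pvOrdered fs).foldl pvABody PySem.Dict.empty = pvG fs := by
  rw [pv_abody_eq, PySem.List.foldl_ite_eq_foldl_filter]
  rfl

theorem pv_getD_G (fs : List (List (String × String))) (c : Char) :
    (pvG fs).getD c [] = (pvF fs).filter (fun f => pvKey f == c) := by
  have h1 : pvG fs = ((pvF fs).map (fun f => (pvKey f, f))).foldl
      (fun d p => d.modify p.1 [] (· ++ [p.2])) PySem.Dict.empty := by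
    rw [List.foldl_map]; rfl
  rw [h1, PySem.Dict.getD_foldl_modify_append]
  rw [List.filter_map]
  simp [Function.comp_def]

theorem pv_keys_G (fs : List (List (String × String))) :
    (pvG fs).keys = PySem.Set.ofList ((pvF fs).map pvKey) := by
  unfold pvG
  rw [PySem.Dict.keys_foldl_modify_key (pvF fs) pvKey [] (fun _ f => (· ++ [f]))]
  rw [show (PySem.Dict.empty : PySem.Dict Char (List (List (String × String)))).keys = [] from rfl]
  exact PySem.Set.update_empty _

theorem pv_nodup_keys_G (fs : List (List (String × String))) : (pvG fs).keys.Nodup := by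
  rw [pv_keys_G]; exact PySem.Set.nodup_ofList _

theorem pv_mem_keys_G (fs : List (List (String × String))) (c : Char) :
    c ∈ (pvG fs).keys ↔ ∃ f ∈ pvF fs, pvKey f = c := by
  rw [pv_keys_G, PySem.Set.mem_ofList]
  simp [List.mem_map]

theorem pv_sorted_keys (fs : List (List (String × String))) :
    PySem.List.sorted (pvG fs).keys (fun k => k) = pvC fs := by
  apply PySem.List.sorted_eq_of_perm_of_pairwise_lt
  . unfold pvC
    rw [List.perm_ext_iff_of_nodup
      ((by decide : pvL27.Nodup).filter _) (pv_nodup_keys_G fs)]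
    intro c
    rw [List.mem_filter, pv_mem_keys_G]
    constructor
    . rintro ⟨-, h⟩
      rcases List.any_eq_true.mp h with ⟨f, hf, hc⟩
      exact ⟨f, hf, by simpa using hc⟩
    . rintro ⟨f, hf, hc⟩
      refine ⟨?_, List.any_eq_true.mpr ⟨f, hf, by simpa using hc⟩⟩
      rw [← hc]; exact pv_letterB_mem (pvName f)
  . exact (by decide : pvL27.Pairwise (· < ·)).filter _

theorem pv_sect_eq (fs : List (List (String × String))) (c : Char) :
    pvSectionB (pvOrdered fs) c = ((pvF fs).filter (fun f => pvKey f == c)).map pvEntryLineB := by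
  unfold pvSectionB
  rw [PySem.List.foldl_append_ite
    (fun func => (PySem.Dict.mk func).getD "name" "" ≠ "" ∧
      pvLetterB ((PySem.Dict.mk func).getD "name" "") = c) pvEntryLineB]
  rw [List.nil_append]
  congr 1
  rw [pvF, List.filter_filter]
  apply List.filter_congr
  intro f _
  by_cases h1 : pvName f ≠ "" <;> by_cases h2 : pvKey f = c <;>
    simp only [pvName, pvKey] at h1 h2 <;> simp_all [pvName, pvKey]

theorem pv_sect_ne_nil (fs : List (List (String × String))) (c : Char) :
    decide (pvSectionB (pvOrdered fs) c ≠ []) = (pvF fs).any (fun f => pvKey f == c) := by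
  rw [pv_sect_eq fs c]
  by_cases h : (pvF fs).any (fun f => pvKey f == c) = true
  . rw [h, decide_eq_true_eq]
    rcases List.any_eq_true.mp h with ⟨f, hf, hc⟩
    intro hnil
    rw [List.map_eq_nil_iff, List.filter_eq_nil_iff] at hnil
    exact absurd hc (by simpa using hnil f hf)
  . rw [Bool.not_eq_true] at h
    rw [h, decide_eq_false_iff_not]
    intro hne
    apply hne
    rw [List.map_eq_nil_iff, List.filter_eq_nil_iff]
    intro f hf
    simp only [Bool.not_eq_true]
    by_contra hc
    have hct : (pvKey f == c) = true := by simpa using hc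
    have hany : ((pvF fs).any fun f => pvKey f == c) = true :=
      List.any_eq_true.mpr ⟨f, hf, hct⟩
    rw [h] at hany
    exact Bool.false_ne_true hany

theorem pv_phaseA (fs : List (List (String × String))) :
    generate_index_page fs = PySem.Str.join "\n" (pvTarget fs) := by
  show PySem.Str.join "\n"
      ((PySem.List.sorted ((pvOrdered fs).foldl pvABody PySem.Dict.empty).keys (fun k => k)).foldl
        (pvAOuter ((pvOrdered fs).foldl pvABody PySem.Dict.empty)) pvInit)
    = PySem.Str.join "\n" (pvTarget fs)
  rw [pv_grouped_eq fs, pv_sorted_keys fs]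
  congr 1
  unfold pvTarget
  apply PySem.List.foldl_congr_mem
  intro acc c _
  show ((acc ++ ["## " ++ String.ofList [c] ++ "\n"]) |>
      ((pvG fs).getD c []).foldl (fun content func => content ++ [pvALine func])) ++ [""] = _
  rw [PySem.List.foldl_append_singleton_eq_map pvALine, pv_getD_G fs c]
  rfl

theorem pv_phaseB (fs : List (List (String × String))) :
    generate_index_page_alt fs = PySem.Str.join "\n" (pvTarget fs) := by
  show PySem.Str.join "\n"
      (pvL27.foldl
        (fun lines letter =>
          if pvSectionB (pvOrdered fs) letter ≠ [] then
            lines ++ ["## " ++ String.ofList [letter] ++ "\n"] ++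
              pvSectionB (pvOrdered fs) letter ++ [""]
          else lines)
        pvInit)
    = PySem.Str.join "\n" (pvTarget fs)
  rw [PySem.List.foldl_ite_eq_foldl_filter
    (fun c => pvSectionB (pvOrdered fs) c ≠ [])
    (fun lines c => lines ++ ["## " ++ String.ofList [c] ++ "\n"] ++
      pvSectionB (pvOrdered fs) c ++ [""])]
  rw [show pvL27.filter (fun c => decide (pvSectionB (pvOrdered fs) c ≠ [])) = pvC fs by
    unfold pvC
    apply List.filter_congr
    intro c _
    exact pv_sect_ne_nil fs c]
  congr 1
  unfold pvTarget
  apply PySem.List.foldl_congr_mem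
  intro acc c _
  rw [pv_sect_eq fs c]
  rfl

-- ===== VERDICT (by name: the statement is the Claim_ definition above) =====
theorem generate_index_page_spec : Claim_equal_generate_index_page := by
  intro functions _
  show generate_index_page functions = generate_index_page_alt functions
  rw [pv_phaseA, pv_phaseB]
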